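-- pv_equiv track=rewrite | github.com/miliar/Code_Jam_Webscraper | solutions_python/Problem_178/3624.py | flipTop
-- ===== SOURCE A (Python) =====
-- from collections import deque
--
-- def flipTop(n, stack):
--     tempQ = deque([])
--     tempS = deque(stack)
--     for i in range(n):
--         tempQ.append(tempS.popleft())
--
--     tempQ = change(tempQ)
--     for i in range(n):
--         tempS.appendleft(tempQ.pop())
--
--     return list(tempS)
--
-- def change(stack):
--     for i in range(len(stack)):
--         if stack[i] == '+':
--             stack[i] = '-'
--         elif stack[i] == '-':
--             stack[i] = '+'
--
--     return stack
-- ===== SOURCE B (Python) =====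
-- def _flip(c):
--     return '-' if c == '+' else '+' if c == '-' else c
--
-- def flipTop(n, stack):
--     return [_flip(s) if i < n else s for i, s in enumerate(stack)]
-- ===== Notes on version B (the rewrite author's own statement) =====
-- stated objective: simpler
-- what changed: Replaces the two deque-shuffling loops plus an in-place mutating change() pass with a single enumerate comprehension that flips the sign of each element whose index is below n (one pass, no deque construction).
-- crash fix: When n > len(stack) A raises IndexError on popleft from the emptied deque; B returns the whole stack with every '+'/'-' flipped. — e.g. on flipTop(3, ["+", "x"]): A raises IndexError, B returns ["-", "x"]
import Mathlib
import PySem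

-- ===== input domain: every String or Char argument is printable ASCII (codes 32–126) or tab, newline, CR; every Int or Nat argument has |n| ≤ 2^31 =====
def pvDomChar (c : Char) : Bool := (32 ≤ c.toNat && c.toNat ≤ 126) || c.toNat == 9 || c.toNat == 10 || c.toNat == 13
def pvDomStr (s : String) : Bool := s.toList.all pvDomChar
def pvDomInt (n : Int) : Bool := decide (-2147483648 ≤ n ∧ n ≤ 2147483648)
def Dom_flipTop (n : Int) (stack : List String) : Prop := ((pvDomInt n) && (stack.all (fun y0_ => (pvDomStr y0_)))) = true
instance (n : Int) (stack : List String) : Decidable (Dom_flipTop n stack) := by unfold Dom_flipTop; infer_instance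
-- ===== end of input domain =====

-- B replaces A's two deque loops + in-place change() pass with one enumerate comprehension (simpler; equivalence is about the return value only).

-- ===== PORT A =====
-- for i in range(n): tempQ.append(tempS.popleft())  — on empty tempS Python raises IndexError;
-- the port returns the state unchanged there (excluded by Pre_flipTop).
def pvPopLoop : Nat → List String → List String → (List String × List String)
  | 0, q, s => (q, s)
  | Nat.succ k, q, s =>
    match s with
    | [] => (q, s)            -- IndexError in Python; outside Pre_
    | x :: rest => pvPopLoop k (q ++ [x]) rest

-- change(stack): in-place pass over the deque
def pvChange (q : List String) : List String :=
  q.map (fun c => if c = "+" then "-" else if c = "-" then "+" else c)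

-- for i in range(n): tempS.appendleft(tempQ.pop())
def pvPushLoop : Nat → List String → List String → (List String × List String)
  | 0, q, s => (q, s)
  | Nat.succ k, q, s =>
    match q.getLast? with
    | none => (q, s)          -- IndexError in Python; unreachable under Pre_
    | some x => pvPushLoop k q.dropLast (x :: s)

def flipTop (n : Int) (stack : List String) : List String :=
  let p := pvPopLoop n.toNat [] stack
  let q := pvChange p.1
  (pvPushLoop n.toNat q p.2).2

-- ===== PORT B =====
def pvFlip (c : String) : String :=
  if c = "+" then "-" else if c = "-" then "+" else c

def flipTop_alt (n : Int) (stack : List String) : List String :=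
  (PySem.List.enumerate stack).map (fun p => if p.1 < n then pvFlip p.2 else p.2)

-- ===== PRECONDITION & SPEC =====
-- Pre_ excludes n > len(stack), where A raises IndexError (popleft from an empty deque).
def Pre_flipTop (n : Int) (stack : List String) : Prop := n ≤ (stack.length : Int)
instance (n : Int) (stack : List String) : Decidable (Pre_flipTop n stack) := by unfold Pre_flipTop; infer_instance
def pvWitness_flipTop : Int × List String := (2, ["+", "-", "x"])

-- When n > len(stack) A raises IndexError; B returns the whole stack with every '+'/'-' flipped
def Raises_flipTop (n : Int) (stack : List String) : Prop := (stack.length : Int) < n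
instance (n : Int) (stack : List String) : Decidable (Raises_flipTop n stack) := by unfold Raises_flipTop; infer_instance
def pvRaiseWitness_flipTop : Int × List String := (3, ["+", "x"])
def pvRaiseWitnessOut_flipTop : List String := ["-", "x"]

def Spec_flipTop (n : Int) (stack : List String) (out : List String) : Prop := out = flipTop_alt n stack
instance (n : Int) (stack : List String) (out : List String) : Decidable (Spec_flipTop n stack out) := by unfold Spec_flipTop; infer_instance

-- ===== CLAIM (what is proved, stated in full; the proofs are below) =====
def Claim_equal_flipTop : Prop := ∀ (n : Int) (stack : List String), Dom_flipTop n stack → Pre_flipTop n stack → Spec_flipTop n stack (flipTop n stack)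
def Claim_raises_flipTop : Prop := (∀ (n : Int) (stack : List String), Dom_flipTop n stack → Raises_flipTop n stack → ¬ Pre_flipTop n stack) ∧ (Dom_flipTop (pvRaiseWitness_flipTop.1) (pvRaiseWitness_flipTop.2) ∧ Raises_flipTop (pvRaiseWitness_flipTop.1) (pvRaiseWitness_flipTop.2) ∧ flipTop_alt (pvRaiseWitness_flipTop.1) (pvRaiseWitness_flipTop.2) = pvRaiseWitnessOut_flipTop)

-- ===== LEMMAS AND PROOFS =====

-- first loop: with k ≤ |s|, it moves the first k elements of s onto the back of q
theorem pvPopLoop_eq (k : Nat) : ∀ (q s : List String), k ≤ s.length →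
    pvPopLoop k q s = (q ++ s.take k, s.drop k) := by
  induction k with
  | zero => intro q s _; simp [pvPopLoop]
  | succ k ih =>
    intro q s hk
    match s with
    | [] => simp at hk
    | x :: rest =>
      simp only [pvPopLoop]
      rw [ih (q ++ [x]) rest (by simpa using hk)]
      simp

-- second loop: run |q| times, it prepends q (order preserved) onto s
theorem pvPushLoop_eq (q : List String) : ∀ (s : List String),
    pvPushLoop q.length q s = ([], q ++ s) := by
  induction q using List.reverseRecOn with
  | nil => intro s; simp [pvPushLoop]
  | append_singleton q' x ih =>
    intro s
    simp only [List.length_append, List.length_singleton]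
    show pvPushLoop (q'.length + 1) (q' ++ [x]) s = _
    rw [show q'.length + 1 = Nat.succ q'.length from rfl]
    simp only [pvPushLoop, List.getLast?_append, List.getLast?_singleton,
      Option.some_or, List.dropLast_concat]
    rw [ih (x :: s)]
    simp

theorem pvPushLoop_eq' (k : Nat) (q s : List String) (h : k = q.length) :
    pvPushLoop k q s = ([], q ++ s) := h ▸ pvPushLoop_eq q s

theorem pvChange_eq (q : List String) : pvChange q = q.map pvFlip := by
  simp [pvChange, pvFlip]

-- B on (enumerate from st, i < n) equals map-flip on the first (n - st).toNat elements
theorem alt_split (l : List String) : ∀ (st n : Int),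
    (PySem.List.enumerate l st).map (fun p => if p.1 < n then pvFlip p.2 else p.2)
      = (l.take (n - st).toNat).map pvFlip ++ l.drop (n - st).toNat := by
  induction l with
  | nil => intro st n; simp [PySem.List.enumerate_nil]
  | cons x xs ih =>
    intro st n
    simp only [PySem.List.enumerate_cons, List.map_cons]
    rw [ih (st + 1) n]
    by_cases h : st < n
    · rw [if_pos h]
      have hk : (n - st).toNat = (n - (st + 1)).toNat + 1 := by omega
      rw [hk]
      simp
    · rw [if_neg h]
      have hk : (n - st).toNat = 0 := by omega
      have hk' : (n - (st + 1)).toNat = 0 := by omega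
      rw [hk, hk']
      simp

theorem flipTop_spec : Claim_equal_flipTop := by
  intro n stack _ hpre
  unfold Spec_flipTop flipTop flipTop_alt Pre_flipTop at *
  have hk : n.toNat ≤ stack.length := by omega
  rw [pvPopLoop_eq n.toNat [] stack hk]
  simp only [List.nil_append]
  rw [pvChange_eq]
  have hlen : n.toNat = ((stack.take n.toNat).map pvFlip).length := by
    simp [List.length_take, Nat.min_eq_left hk]
  rw [pvPushLoop_eq' _ _ _ hlen]
  rw [alt_split stack 0 n]
  simp

theorem flipTop_raises : Claim_raises_flipTop := by
  unfold Claim_raises_flipTop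
  constructor
  · intro n stack _ hr hp
    exact absurd hp (by unfold Pre_flipTop; unfold Raises_flipTop at hr; omega)
  · exact ⟨by decide, by decide, by decide⟩

-- self-check: the raise-witness value recorded above is what B's port computes (read off flipTop_raises)
theorem pvRaiseWitness_ok : flipTop_alt pvRaiseWitness_flipTop.1 pvRaiseWitness_flipTop.2 = pvRaiseWitnessOut_flipTop :=
  flipTop_raises.2.2.2
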